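-- pv_equiv track=rewrite | github.com/SergeevJegor/SPbU-homework | Semester_4/math_logic/specification.py | find_neutral
-- ===== SOURCE A (Python) =====
-- def find_neutral(c):
--     for i in range(len(c)):
--         flag = True
--         for j in range(len(c)):
--             if c[i][j] != j or c[j][i] != j:
--                 flag = False
--                 break
--         if flag:
--             return True, i
--     return False, None
-- ===== SOURCE B (Python) =====
-- def find_neutral(c):
--     n = len(c)
--     ident = list(range(n))
--     row_ok = [i for i in range(n) if c[i] == ident]
--     for i in row_ok:
--         if [c[j][i] for j in range(n)] == ident:
--             return True, i
--     return False, None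
-- ===== Notes on version B (the rewrite author's own statement) =====
-- stated objective: alternative
-- what changed: A interleaves the row and column tests cell by cell with an early break inside one nested loop; B first builds the list of row candidates by whole-list equality with list(range(n)) in one pass and then materialises and compares only the candidates' columns in a second pass.
-- outside the precondition, e.g. on find_neutral([[0, 1, 7], [1, 0]]): A returns (True, 0), B returns (False, None)
import Mathlib
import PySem

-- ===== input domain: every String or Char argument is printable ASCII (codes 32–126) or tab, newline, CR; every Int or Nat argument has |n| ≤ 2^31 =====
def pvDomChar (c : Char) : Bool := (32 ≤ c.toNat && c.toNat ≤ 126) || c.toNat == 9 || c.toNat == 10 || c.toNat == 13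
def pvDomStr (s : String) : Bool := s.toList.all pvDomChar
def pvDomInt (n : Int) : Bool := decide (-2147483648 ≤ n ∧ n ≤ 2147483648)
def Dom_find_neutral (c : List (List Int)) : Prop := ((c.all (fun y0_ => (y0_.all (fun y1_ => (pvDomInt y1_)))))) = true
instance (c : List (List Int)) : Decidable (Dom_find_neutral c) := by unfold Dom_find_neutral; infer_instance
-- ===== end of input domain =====

-- B replaces A's interleaved per-cell row+column check (nested loop with break) by two passes:
-- collect row candidates by whole-list equality with the identity row, then test only candidates' columns.


-- ===== PORT A =====
-- c[i][j] on the in-range indices Pre_ guarantees (the default is never the returned value there)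
def pvIdxA (c : List (List Int)) (i j : Int) : Int :=
  PySem.List.pyGetD (PySem.List.pyGetD c i []) j 0

-- inner 'for j in range(len(c)): if c[i][j] != j or c[j][i] != j: flag = False; break'
def pvCheckA (c : List (List Int)) (i : Int) : List Int → Bool
  | [] => true
  | j :: js => if pvIdxA c i j ≠ j ∨ pvIdxA c j i ≠ j then false else pvCheckA c i js

-- outer 'for i in range(len(c)): … if flag: return True, i'
def pvLoopA (c : List (List Int)) : List Int → Bool × Option Int
  | [] => (false, none)
  | i :: is =>
    if pvCheckA c i (PySem.List.pyRange 0 (c.length : Int) 1) then (true, some i)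
    else pvLoopA c is

def find_neutral (c : List (List Int)) : Bool × Option Int :=
  pvLoopA c (PySem.List.pyRange 0 (c.length : Int) 1)

-- ===== PORT B =====
def pvRowB (c : List (List Int)) (i : Int) : List Int := PySem.List.pyGetD c i []

-- '[c[j][i] for j in range(n)]'
def pvColB (c : List (List Int)) (i : Int) : List Int :=
  (PySem.List.pyRange 0 (c.length : Int) 1).map
    (fun j => PySem.List.pyGetD (PySem.List.pyGetD c j []) i 0)

-- 'for i in row_ok: if column(i) == ident: return True, i'
def pvLoopB (c : List (List Int)) (ident : List Int) : List Int → Bool × Option Int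
  | [] => (false, none)
  | i :: is => if pvColB c i = ident then (true, some i) else pvLoopB c ident is

def find_neutral_alt (c : List (List Int)) : Bool × Option Int :=
  let ident := PySem.List.pyRange 0 (c.length : Int) 1
  let row_ok := (PySem.List.pyRange 0 (c.length : Int) 1).filter (fun i => pvRowB c i == ident)
  pvLoopB c ident row_ok

-- ===== PRECONDITION & SPEC =====
-- Pre_ restricts to the natural domain of square operation tables, plus ragged tables every row of
-- which starts with a nonzero entry (both programs trivially reject those); other ragged tables are
-- excluded because there A may raise IndexError or accidentally accept a row whose length-n prefix
-- is the identity.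
def Pre_find_neutral (c : List (List Int)) : Prop :=
  (∀ row ∈ c, row.length = c.length) ∨ (∀ row ∈ c, row.headI ≠ 0)
instance (c : List (List Int)) : Decidable (Pre_find_neutral c) := by
  unfold Pre_find_neutral; infer_instance

def pvWitness_find_neutral : List (List Int) := [[0, 1], [1, 0]]

def Spec_find_neutral (c : List (List Int)) (out : Bool × Option Int) : Prop := out = find_neutral_alt c
instance (c : List (List Int)) (out : Bool × Option Int) : Decidable (Spec_find_neutral c out) := by unfold Spec_find_neutral; infer_instance

-- ===== CLAIM (what is proved, stated in full; the proofs are below) =====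
def Claim_equal_find_neutral : Prop := ∀ (c : List (List Int)), Dom_find_neutral c → Pre_find_neutral c → Spec_find_neutral c (find_neutral c)

-- ===== LEMMAS AND PROOFS =====

-- generic first-match, the common shape of both loops
def pvFind (f : Int → Bool) : List Int → Bool × Option Int
  | [] => (false, none)
  | i :: is => if f i then (true, some i) else pvFind f is

theorem pvLoopA_eq_find (c : List (List Int)) (l : List Int) :
    pvLoopA c l = pvFind (fun i => pvCheckA c i (PySem.List.pyRange 0 (c.length : Int) 1)) l := by
  induction l with
  | nil => rfl
  | cons i is ih => simp [pvLoopA, pvFind, ih]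

theorem pvLoopB_filter (c : List (List Int)) (ident : List Int) (p : Int → Bool) (l : List Int) :
    pvLoopB c ident (l.filter p) = pvFind (fun i => p i && (pvColB c i == ident)) l := by
  induction l with
  | nil => rfl
  | cons i is ih =>
    by_cases h : p i
    · by_cases h2 : pvColB c i = ident <;>
        simp [h, pvLoopB, pvFind, h2, ih]
    · simp [h, pvFind, ih]

theorem pvFind_congr (f g : Int → Bool) (l : List Int) (h : ∀ i ∈ l, f i = g i) :
    pvFind f l = pvFind g l := by
  induction l with
  | nil => rfl
  | cons i is ih =>
    simp only [pvFind, h i (by simp)]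
    rw [ih (fun j hj => h j (by simp [hj]))]

theorem pvFind_false (f : Int → Bool) (l : List Int) (h : ∀ i ∈ l, f i = false) :
    pvFind f l = (false, none) := by
  induction l with
  | nil => rfl
  | cons i is ih =>
    simp [pvFind, h i (by simp), ih (fun j hj => h j (by simp [hj]))]

theorem pvCheckA_eq_all (c : List (List Int)) (i : Int) (l : List Int) :
    pvCheckA c i l = l.all (fun j => (pvIdxA c i j == j) && (pvIdxA c j i == j)) := by
  induction l with
  | nil => rfl
  | cons j js ih =>
    by_cases h1 : pvIdxA c i j = j <;> by_cases h2 : pvIdxA c j i = j <;>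
      simp [pvCheckA, h1, h2, ih]

theorem pvMap_eq_self (f : Int → Int) (l : List Int) :
    (l.map f = l) ↔ (∀ x ∈ l, f x = x) := by
  induction l with
  | nil => simp
  | cons x xs ih => simp [ih]

theorem pvAll_and (l : List Int) (p q : Int → Bool) :
    (l.all fun x => p x && q x) = (l.all p && l.all q) := by
  induction l with
  | nil => rfl
  | cons x xs ih => simp [ih]; ac_rfl

theorem pvCheck_eq_rowcol (c : List (List Int)) (hsq : ∀ row ∈ c, row.length = c.length)
    (i : Int) (hi : i ∈ PySem.List.pyRange 0 (c.length : Int) 1) :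
    pvCheckA c i (PySem.List.pyRange 0 (c.length : Int) 1) =
      ((pvRowB c i == PySem.List.pyRange 0 (c.length : Int) 1) &&
       (pvColB c i == PySem.List.pyRange 0 (c.length : Int) 1)) := by
  obtain ⟨h0, h1⟩ := PySem.List.mem_pyRange_one.1 hi
  have hmem : PySem.List.pyGetD c i [] ∈ c :=
    PySem.List.pyGetD_mem c [] (by simp [PySem.Raise.InRange]; omega)
  have hrl : (PySem.List.pyGetD c i []).length = c.length := hsq _ hmem
  have hmapA : (PySem.List.pyRange 0 (c.length : Int) 1).map
      (fun j => PySem.List.pyGetD (PySem.List.pyGetD c i []) j 0) = PySem.List.pyGetD c i [] := by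
    have h := PySem.List.map_pyGetD_pyRange_zero' (PySem.List.pyGetD c i []) 0
    rwa [hrl] at h
  have hA : ((PySem.List.pyRange 0 (c.length : Int) 1).all fun j => pvIdxA c i j == j)
      = (pvRowB c i == PySem.List.pyRange 0 (c.length : Int) 1) := by
    simp only [pvIdxA, pvRowB]
    rw [Bool.eq_iff_iff]
    simp only [List.all_eq_true, beq_iff_eq]
    conv_rhs => rw [← hmapA]
    exact (pvMap_eq_self _ _).symm
  have hB : ((PySem.List.pyRange 0 (c.length : Int) 1).all fun j => pvIdxA c j i == j)
      = (pvColB c i == PySem.List.pyRange 0 (c.length : Int) 1) := by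
    simp only [pvIdxA, pvColB]
    rw [Bool.eq_iff_iff]
    simp only [List.all_eq_true, beq_iff_eq]
    exact (pvMap_eq_self _ _).symm
  rw [pvCheckA_eq_all, pvAll_and, hA, hB]

theorem find_neutral_spec_aux (c : List (List Int)) (h : Pre_find_neutral c) :
    find_neutral c = find_neutral_alt c := by
  unfold find_neutral find_neutral_alt
  rw [pvLoopA_eq_find, pvLoopB_filter]
  rcases h with hsq | hhd
  · exact pvFind_congr _ _ _ (fun i hi => pvCheck_eq_rowcol c hsq i hi)
  · rw [pvFind_false, pvFind_false]
    · intro i hi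
      obtain ⟨h0, h1⟩ := PySem.List.mem_pyRange_one.1 hi
      have hn : (0 : Int) < (c.length : Int) := lt_of_le_of_lt h0 h1
      have hrng : PySem.List.pyRange 0 (c.length : Int) 1
          = 0 :: PySem.List.pyRange 1 (c.length : Int) 1 := PySem.List.pyRange_one_cons hn
      have hmem : PySem.List.pyGetD c i [] ∈ c :=
        PySem.List.pyGetD_mem c [] (by simp [PySem.Raise.InRange]; omega)
      have hhead : (PySem.List.pyGetD c i []).headI ≠ 0 := hhd _ hmem
      have hneq : pvRowB c i ≠ PySem.List.pyRange 0 (c.length : Int) 1 := by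
        rw [pvRowB, hrng]
        intro heq
        rw [heq] at hhead
        simp [List.headI] at hhead
      simp [hneq]
    · intro i hi
      obtain ⟨h0, h1⟩ := PySem.List.mem_pyRange_one.1 hi
      have hn : (0 : Int) < (c.length : Int) := lt_of_le_of_lt h0 h1
      have hrng : PySem.List.pyRange 0 (c.length : Int) 1
          = 0 :: PySem.List.pyRange 1 (c.length : Int) 1 := PySem.List.pyRange_one_cons hn
      have hmem : PySem.List.pyGetD c i [] ∈ c :=
        PySem.List.pyGetD_mem c [] (by simp [PySem.Raise.InRange]; omega)
      have hhead : (PySem.List.pyGetD c i []).headI ≠ 0 := hhd _ hmem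
      have hidx : pvIdxA c i 0 ≠ 0 := by
        rw [pvIdxA]
        cases hc : PySem.List.pyGetD c i [] with
        | nil => rw [hc] at hhead; simp [List.headI] at hhead
        | cons r0 rs =>
          rw [hc] at hhead
          simpa [PySem.List.pyGetD_zero_cons] using hhead
      rw [hrng]
      simp [pvCheckA, hidx]

-- ===== VERDICT (by name: the statement is the Claim_ definition above) =====
theorem find_neutral_spec : Claim_equal_find_neutral := by
  intro c _ hPre
  unfold Spec_find_neutral
  exact find_neutral_spec_aux c hPre
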